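-- pv_equiv track=rewrite | github.com/Grecu-Narcis/University | Semester 5/Public key cryptography/Labs/Lab3/lab3.py | compute_sequence
-- ===== SOURCE A (Python) =====
-- def compute_sequence(a: int, n: int, s: int, t: int):
--     prev = None
--
--     for i in range(s + 1):
--         exponent = pow(2, i) * t
--         result = pow(a, exponent, n)
--
--         if i == 0 and result == 1:
--             return True
--
--         if result == 1 and prev == n - 1:
--             return True
--
--         prev = result
--
--     return False
-- ===== SOURCE B (Python) =====
-- def compute_sequence(a: int, n: int, s: int, t: int):
--     if s < 0:
--         return False
--     result = pow(a, t, n)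
--     if result == 1:
--         return True
--     for _ in range(s):
--         prev = result
--         result = result * result % n
--         if result == 1 and prev == n - 1:
--             return True
--     return False
-- ===== Notes on version B (the rewrite author's own statement) =====
-- stated objective: faster
-- what changed: Instead of recomputing pow(a, 2**i * t, n) from scratch at every loop index, B computes pow(a, t, n) once and squares the running residue modulo n at each step.
-- outside the precondition, e.g. on compute_sequence(2, 5, 1, -1): A returns False, B returns False; on compute_sequence(3, 10, 2, -3): A returns True, B returns True
import Mathlib
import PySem

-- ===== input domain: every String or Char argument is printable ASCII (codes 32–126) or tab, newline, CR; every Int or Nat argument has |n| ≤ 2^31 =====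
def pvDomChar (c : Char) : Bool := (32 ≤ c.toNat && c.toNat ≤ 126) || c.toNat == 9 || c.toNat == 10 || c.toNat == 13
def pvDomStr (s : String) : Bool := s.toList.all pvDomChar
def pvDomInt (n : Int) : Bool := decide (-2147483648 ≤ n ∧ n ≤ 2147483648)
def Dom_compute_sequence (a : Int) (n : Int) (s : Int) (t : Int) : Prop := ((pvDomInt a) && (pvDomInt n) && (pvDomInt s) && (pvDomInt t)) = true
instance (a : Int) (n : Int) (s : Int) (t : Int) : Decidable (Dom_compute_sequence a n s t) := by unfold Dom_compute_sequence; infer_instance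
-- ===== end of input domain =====

-- B replaces A's per-step full modular exponentiation (pow(a, 2^i*t, n) recomputed at every i)
-- by one pow(a, t, n) followed by one modular squaring per step; objective: faster (O(s) modmuls vs O(s^2)).

-- shared helper: Python's three-argument pow(b, e, m) (b ≥ 0 exponent), by binary
-- exponentiation so that it is evaluable; proved equal to PySem.Int.powMod below.
def pyPowMod (b : Int) (m : Int) : Nat → Int
  | 0 => PySem.Int.mod 1 m
  | e + 1 =>
    let h := pyPowMod b m ((e + 1) / 2)
    let sq := PySem.Int.mod (h * h) m
    if (e + 1) % 2 = 1 then PySem.Int.mod (sq * b) m else sq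
  decreasing_by exact Nat.div_lt_self (Nat.succ_pos e) one_lt_two

-- ===== PORT A =====
-- loop over the range list, carrying prev : Option Int (Python's prev, initially None)
def computeSeqLoopA (a : Int) (n : Int) (t : Int) : List Int → Option Int → Bool
  | [], _ => false
  | i :: rest, prev =>
    let exponent : Int := (2 : Int) ^ i.toNat * t   -- pow(2, i): i ≥ 0 on every range element
    let result := pyPowMod a n exponent.toNat   -- pow(a, exponent, n); exponent ≥ 0 under Pre_
    if i = 0 ∧ result = 1 then true
    else if result = 1 ∧ prev = some (n - 1) then true
    else computeSeqLoopA a n t rest (some result)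

def compute_sequence (a : Int) (n : Int) (s : Int) (t : Int) : Bool :=
  computeSeqLoopA a n t (PySem.List.pyRange 0 (s + 1)) none

-- ===== PORT B =====
-- counted loop: square the running residue once per step
def computeSeqLoopB (n : Int) : Nat → Int → Bool
  | 0, _ => false
  | k + 1, result0 =>
    let prev := result0
    let result := PySem.Int.mod (result0 * result0) n
    if result = 1 ∧ prev = n - 1 then true
    else computeSeqLoopB n k result

def compute_sequence_alt (a : Int) (n : Int) (s : Int) (t : Int) : Bool :=
  if s < 0 then false
  else
    let result := pyPowMod a n t.toNat
    if result = 1 then true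
    else computeSeqLoopB n s.toNat result

-- ===== PRECONDITION & SPEC =====
-- When the loop runs at all (s ≥ 0), Pre_ excludes n = 0 (Python pow(a, e, 0) raises
-- ValueError) and t < 0 (pow with a negative exponent raises ValueError whenever a is not
-- invertible mod n; the inverse-based sequence of the invertible corner is out of scope).
def Pre_compute_sequence (a : Int) (n : Int) (s : Int) (t : Int) : Prop := s < 0 ∨ (n ≠ 0 ∧ 0 ≤ t)
instance (a : Int) (n : Int) (s : Int) (t : Int) : Decidable (Pre_compute_sequence a n s t) := by unfold Pre_compute_sequence; infer_instance
def pvWitness_compute_sequence : Int × Int × Int × Int := (2, 13, 2, 3)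
def Spec_compute_sequence (a : Int) (n : Int) (s : Int) (t : Int) (out : Bool) : Prop := out = compute_sequence_alt a n s t
instance (a : Int) (n : Int) (s : Int) (t : Int) (out : Bool) : Decidable (Spec_compute_sequence a n s t out) := by unfold Spec_compute_sequence; infer_instance

-- ===== CLAIM (what is proved, stated in full; the proofs are below) =====
def Claim_equal_compute_sequence : Prop := ∀ (a : Int) (n : Int) (s : Int) (t : Int), Dom_compute_sequence a n s t → Pre_compute_sequence a n s t → Spec_compute_sequence a n s t (compute_sequence a n s t)

-- ===== LEMMAS AND PROOFS =====

-- Python's % (fmod) depends on its argument only through its residue class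
theorem pv_mod_congr {n x y : Int} (hn : n ≠ 0) (h : n ∣ x - y) :
    PySem.Int.mod x n = PySem.Int.mod y n := by
  have hx := PySem.Int.floordiv_mul_add_mod x n
  have hy := PySem.Int.floordiv_mul_add_mod y n
  have hdvd : n ∣ PySem.Int.mod x n - PySem.Int.mod y n := by
    obtain ⟨c, hc⟩ := h
    exact ⟨c - PySem.Int.floordiv x n + PySem.Int.floordiv y n, by nlinarith [hx, hy]⟩
  rcases lt_or_gt_of_ne hn with hneg | hpos
  · obtain ⟨hx1, hx2⟩ := PySem.Int.mod_neg_bounds x hneg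
    obtain ⟨hy1, hy2⟩ := PySem.Int.mod_neg_bounds y hneg
    have : PySem.Int.mod x n - PySem.Int.mod y n = 0 :=
      Int.eq_zero_of_abs_lt_dvd ((neg_dvd).mpr hdvd) (by rw [abs_lt]; omega)
    omega
  · obtain hx1 := PySem.Int.mod_nonneg x hpos
    obtain hx2 := PySem.Int.mod_lt x hpos
    obtain hy1 := PySem.Int.mod_nonneg y hpos
    obtain hy2 := PySem.Int.mod_lt y hpos
    have : PySem.Int.mod x n - PySem.Int.mod y n = 0 :=
      Int.eq_zero_of_abs_lt_dvd hdvd (by rw [abs_lt]; omega)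
    omega

-- multiplying by a residue is multiplying by the value
theorem pv_mod_mul {n : Int} (hn : n ≠ 0) (x y : Int) :
    PySem.Int.mod (PySem.Int.mod x n * y) n = PySem.Int.mod (x * y) n := by
  have h : n ∣ x - PySem.Int.mod x n :=
    ⟨PySem.Int.floordiv x n, by linarith [PySem.Int.floordiv_mul_add_mod x n]⟩
  obtain ⟨c, hc⟩ := h
  apply pv_mod_congr hn
  refine ⟨-(c * y), ?_⟩
  have hm : PySem.Int.mod x n = x - n * c := by linarith
  rw [hm]; ring

-- squaring a residue is squaring the value
theorem pv_mod_sq {n : Int} (hn : n ≠ 0) (x : Int) :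
    PySem.Int.mod (PySem.Int.mod x n * PySem.Int.mod x n) n = PySem.Int.mod (x * x) n := by
  rw [pv_mod_mul hn, mul_comm x (PySem.Int.mod x n), pv_mod_mul hn]

-- the binary-exponentiation helper computes pow(b, e, m)
theorem pyPowMod_eq {b m : Int} (hm : m ≠ 0) (e : Nat) :
    pyPowMod b m e = PySem.Int.powMod b e m := by
  induction e using Nat.strong_induction_on with
  | _ e ih =>
    match e with
    | 0 => simp [pyPowMod, PySem.Int.powMod]
    | e + 1 =>
      rw [pyPowMod]
      have ihh := ih ((e + 1) / 2) (Nat.div_lt_self (Nat.succ_pos e) one_lt_two)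
      simp only [ihh, PySem.Int.powMod_eq]
      rw [pv_mod_sq hm, ← pow_add]
      by_cases hpar : (e + 1) % 2 = 1
      · rw [if_pos hpar, pv_mod_mul hm, ← pow_succ]
        have hx : (e + 1) / 2 + (e + 1) / 2 + 1 = e + 1 := by omega
        rw [hx]
      · rw [if_neg hpar]
        have hx : (e + 1) / 2 + (e + 1) / 2 = e + 1 := by omega
        rw [hx]

-- the residue A computes at step k
def pvR (a n t : Int) (k : Nat) : Int := PySem.Int.mod (a ^ (2 ^ k * t.toNat)) n

theorem pvR_succ {a n t : Int} (hn : n ≠ 0) (k : Nat) :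
    pvR a n t (k + 1) = PySem.Int.mod (pvR a n t k * pvR a n t k) n := by
  have hexp : 2 ^ (k + 1) * t.toNat = 2 ^ k * t.toNat + 2 ^ k * t.toNat := by ring
  unfold pvR
  rw [pv_mod_sq hn, ← pow_add, hexp]

theorem pv_exponent_toNat {t : Int} (ht : 0 ≤ t) (k : Nat) :
    ((2 : Int) ^ k * t).toNat = 2 ^ k * t.toNat := by
  rw [Int.toNat_mul (by positivity) ht]
  congr 1

-- main loop correspondence, from index 1 + j on
theorem pv_loop_eq {a n t : Int} (hn : n ≠ 0) (ht : 0 ≤ t) :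
    ∀ (k j : Nat),
      computeSeqLoopA a n t (PySem.List.pyRange (1 + (j : Int)) (1 + j + k)) (some (pvR a n t j))
        = computeSeqLoopB n k (pvR a n t j) := by
  intro k
  induction k with
  | zero =>
    intro j
    simp [computeSeqLoopB, computeSeqLoopA]
  | succ k ih =>
    intro j
    rw [PySem.List.pyRange_one_cons (by push_cast; omega)]
    show computeSeqLoopA a n t _ _ = _
    rw [computeSeqLoopA]
    have hres : pyPowMod a n ((2 : Int) ^ (1 + (j : Int)).toNat * t).toNat
        = pvR a n t (j + 1) := by
      have he : (1 + (j : Int)).toNat = j + 1 := by omega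
      rw [pyPowMod_eq hn, he, PySem.Int.powMod_eq, pv_exponent_toNat ht]
      rfl
    simp only [hres]
    rw [computeSeqLoopB]
    simp only [← pvR_succ hn]
    have hne : ¬ (1 + (j : Int) = 0 ∧ pvR a n t (j + 1) = 1) := by
      rintro ⟨h, -⟩; omega
    rw [if_neg hne]
    by_cases hcond : pvR a n t (j + 1) = 1 ∧ pvR a n t j = n - 1
    · rw [if_pos (by simpa using hcond), if_pos hcond]
    · rw [if_neg (by simpa using hcond), if_neg hcond]
      have h2 : (1 + (j : Int)) + 1 = 1 + ((j + 1 : Nat) : Int) := by push_cast; ring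
      have h3 : (1 : Int) + (j : Int) + ((k + 1 : Nat) : Int)
          = 1 + ((j + 1 : Nat) : Int) + ((k : Nat) : Int) := by push_cast; ring
      rw [h2, h3]
      exact ih (j + 1)

-- ===== VERDICT (by name: the statement is the Claim_ definition above) =====
theorem compute_sequence_spec : Claim_equal_compute_sequence := by
  intro a n s t _ hpre
  unfold Spec_compute_sequence compute_sequence compute_sequence_alt
  by_cases hs : s < 0
  · rw [if_pos hs]
    have hemp : PySem.List.pyRange 0 (s + 1) = [] := by
      rw [PySem.List.pyRange_one]
      simp only [List.map_eq_nil_iff, List.range_eq_nil]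
      omega
    rw [hemp]; rfl
  · obtain ⟨hn, ht⟩ := hpre.resolve_left hs
    rw [if_neg hs]
    rw [PySem.List.pyRange_one_cons (by omega)]
    rw [computeSeqLoopA]
    have hres : pyPowMod a n ((2 : Int) ^ (0 : Int).toNat * t).toNat
        = pyPowMod a n t.toNat := by
      congr 1; simp
    simp only [hres]
    have hR0 : pyPowMod a n t.toNat = pvR a n t 0 := by
      rw [pyPowMod_eq hn, PySem.Int.powMod_eq]; unfold pvR; norm_num
    rcases eq_or_ne (pyPowMod a n t.toNat) 1 with h1 | h1
    · simp [h1]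
    · rw [if_neg (by rintro ⟨-, h⟩; exact h1 h), if_neg h1,
        if_neg (by rintro ⟨-, h⟩; simp at h)]
      rw [hR0]
      have h0 : (0 : Int) + 1 = 1 + ((0 : Nat) : Int) := by norm_num
      have hend : (s : Int) + 1 = 1 + ((0 : Nat) : Int) + ((s.toNat : Nat) : Int) := by
        push_cast; omega
      rw [h0, hend]
      exact pv_loop_eq hn ht s.toNat 0
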